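-- pv_equiv track=rewrite | github.com/kickertw/Aoc2018 | day5_2.py | getReducedPolymerLen
-- ===== SOURCE A (Python) =====
-- def getReducedPolymerLen(inputString):
--     outputString = ""
--     while len(inputString) > 0:
--         if len(outputString) > 0 and outputString[-1].swapcase() == inputString[0]:
--             outputString = outputString[:-1]
--         else:
--             outputString += inputString[0]
--         inputString = inputString[1:]
--     return len(outputString)
-- ===== SOURCE B (Python) =====
-- def _reduce_once(chars):
--     """Return chars with the FIRST reacting adjacent pair deleted, or None if none reacts."""
--     for i in range(len(chars) - 1):
--         if chars[i].swapcase() == chars[i + 1]: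
--             return chars[:i] + chars[i + 2:]
--     return None
--
--
-- def getReducedPolymerLen(inputString):
--     # fixpoint iteration: repeatedly delete the first reacting adjacent pair
--     chars = list(inputString)
--     while True:
--         nxt = _reduce_once(chars)
--         if nxt is None:
--             return len(chars)
--         chars = nxt
-- ===== Notes on version B (the rewrite author's own statement) =====
-- stated objective: faster
-- what changed: Replaces A's left-to-right stack build on a growing output string (which copies the whole string at every character, unconditionally quadratic) with a fixpoint iteration that repeatedly deletes the first reacting adjacent pair until none remains, costing one O(n) scan per deleted pair plus a final scan; equality is proved via confluence of pair cancellation (the stack result is invariant under deleting a reacting adjacent pair).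
import Mathlib
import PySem

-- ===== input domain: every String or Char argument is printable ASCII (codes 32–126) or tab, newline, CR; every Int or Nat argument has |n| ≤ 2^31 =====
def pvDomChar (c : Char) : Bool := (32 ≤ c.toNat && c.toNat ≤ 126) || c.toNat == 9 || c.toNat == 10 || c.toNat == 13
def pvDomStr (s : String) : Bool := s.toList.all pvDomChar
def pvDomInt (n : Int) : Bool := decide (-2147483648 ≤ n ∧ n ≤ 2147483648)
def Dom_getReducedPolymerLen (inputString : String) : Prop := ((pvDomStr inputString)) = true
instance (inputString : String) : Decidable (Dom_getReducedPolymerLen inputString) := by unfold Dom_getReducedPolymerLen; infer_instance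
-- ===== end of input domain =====

-- B replaces A's left-to-right stack build (via string slicing/concatenation) by a
-- different algorithm: repeatedly delete the FIRST reacting adjacent pair until a
-- fixpoint; return values proved equal on Dom (objective: alternative).

-- ===== PORT A =====
-- Python str.swapcase, exact on the ASCII domain (Dom restricts to ASCII).
def pySwapcase (c : Char) : Char :=
  if 'a' ≤ c ∧ c ≤ 'z' then Char.ofNat (c.toNat - 32)
  else if 'A' ≤ c ∧ c ≤ 'Z' then Char.ofNat (c.toNat + 32)
  else c

-- one iteration of A's while loop: outputString is kept as a List Char,
-- outputString[-1] = getLastD, outputString[:-1] = dropLast, += c = ++ [c]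
def stepA (out : List Char) (c : Char) : List Char :=
  if 0 < out.length ∧ pySwapcase (out.getLastD ' ') = c then out.dropLast
  else out ++ [c]

def getReducedPolymerLen (inputString : String) : Int :=
  ((inputString.toList.foldl stepA []).length : Int)

-- ===== PORT B =====
-- _reduce_once: delete the first reacting adjacent pair, none if no pair reacts
def reduceOnce (l : List Char) : Option (List Char) :=
  match l with
  | a :: b :: rest =>
      if pySwapcase a = b then some rest
      else (reduceOnce (b :: rest)).map (a :: ·)
  | _ => none

theorem reduceOnce_length {l l' : List Char} (h : reduceOnce l = some l') :
    l'.length + 2 = l.length := by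
  induction l generalizing l' with
  | nil => simp [reduceOnce] at h
  | cons a t ih =>
      cases t with
      | nil => simp [reduceOnce] at h
      | cons b rest =>
          by_cases hr : pySwapcase a = b
          · simp [reduceOnce, hr] at h; subst h; simp
          · simp only [reduceOnce, if_neg hr, Option.map_eq_some_iff] at h
            obtain ⟨m, hm, rfl⟩ := h
            have := ih hm
            simp at this ⊢
            omega

-- the while loop of B: iterate _reduce_once to a fixpoint
def reduceAll (l : List Char) : List Char :=
  match h : reduceOnce l with
  | some l' => reduceAll l'
  | none => l
termination_by l.length
decreasing_by have := reduceOnce_length h; omega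

def getReducedPolymerLen_alt (inputString : String) : Int :=
  ((reduceAll inputString.toList).length : Int)

-- ===== PRECONDITION & SPEC =====
def Spec_getReducedPolymerLen (inputString : String) (out : Int) : Prop := out = getReducedPolymerLen_alt inputString
instance (inputString : String) (out : Int) : Decidable (Spec_getReducedPolymerLen inputString out) := by unfold Spec_getReducedPolymerLen; infer_instance

-- ===== CLAIM (what is proved, stated in full; the proofs are below) =====
def Claim_equal_getReducedPolymerLen : Prop := ∀ (inputString : String), Dom_getReducedPolymerLen inputString → Spec_getReducedPolymerLen inputString (getReducedPolymerLen inputString)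

-- ===== LEMMAS AND PROOFS =====

theorem le_iff_toNat (a b : Char) : a ≤ b ↔ a.toNat ≤ b.toNat := by
  rw [Char.le_def, UInt32.le_iff_toNat_le]; rfl

theorem swap_invol (c : Char) : pySwapcase (pySwapcase c) = c := by
  have e1 : ('a').toNat = 97 := rfl
  have e2 : ('z').toNat = 122 := rfl
  have e3 : ('A').toNat = 65 := rfl
  have e4 : ('Z').toNat = 90 := rfl
  simp only [pySwapcase, le_iff_toNat, e1, e2, e3, e4]
  by_cases h1 : 97 ≤ c.toNat ∧ c.toNat ≤ 122
  · have ht : (Char.ofNat (c.toNat - 32)).toNat = c.toNat - 32 := by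
      rw [Char.toNat_ofNat, if_pos (Or.inl (by omega))]
    rw [if_pos h1]
    simp only [ht]
    rw [if_neg (by omega), if_pos (by constructor <;> omega)]
    have : c.toNat - 32 + 32 = c.toNat := by omega
    rw [this, Char.ofNat_toNat]
  · by_cases h2 : 65 ≤ c.toNat ∧ c.toNat ≤ 90
    · have ht : (Char.ofNat (c.toNat + 32)).toNat = c.toNat + 32 := by
        rw [Char.toNat_ofNat, if_pos (Or.inl (by omega))]
      rw [if_neg h1, if_pos h2]
      simp only [ht]
      rw [if_pos (by constructor <;> omega)]
      have : c.toNat + 32 - 32 = c.toNat := by omega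
      rw [this, Char.ofNat_toNat]
    · rw [if_neg h1, if_neg h2, if_neg h1, if_neg h2]

-- proof-side mirror of stepA on a reversed stack (top at the head)
def stepB (st : List Char) (c : Char) : List Char :=
  match st with
  | [] => [c]
  | t :: rest => if pySwapcase t = c then rest else c :: t :: rest

theorem stepA_reverse (st : List Char) (c : Char) :
    stepA st.reverse c = (stepB st c).reverse := by
  cases st with
  | nil => simp [stepA, stepB]
  | cons t rest =>
      simp only [stepB, stepA, List.reverse_cons, List.getLastD_concat,
        List.dropLast_concat, List.length_append]
      by_cases h : pySwapcase t = c <;> simp [h]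

theorem foldl_reverse_eq (l : List Char) (st : List Char) :
    l.foldl stepA st.reverse = (l.foldl stepB st).reverse := by
  induction l generalizing st with
  | nil => rfl
  | cons c rest ih => simpa [stepA_reverse] using ih (stepB st c)

-- stack invariant: no two adjacent stack entries react
def Good (st : List Char) : Prop := List.IsChain (fun a b => pySwapcase b ≠ a) st

theorem good_step {st : List Char} (h : Good st) (c : Char) : Good (stepB st c) := by
  cases st with
  | nil => simp [stepB, Good]
  | cons t rest =>
      by_cases hr : pySwapcase t = c
      · simpa [stepB, hr, Good] using h.tail
      · exact by simpa [stepB, hr, Good] using List.isChain_cons_cons.mpr ⟨hr, h⟩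

theorem cancel {st : List Char} (h : Good st) {a b : Char} (hab : pySwapcase a = b) :
    stepB (stepB st a) b = st := by
  cases st with
  | nil => simp [stepB, hab]
  | cons t rest =>
      by_cases ht : pySwapcase t = a
      · have hb : b = t := by rw [← hab, ← ht, swap_invol]
        subst hb
        cases rest with
        | nil => simp [stepB, ht]
        | cons u r' =>
            have hu : pySwapcase u ≠ b := (List.isChain_cons_cons.mp h).1
            simp [stepB, ht, hu]
      · simp [stepB, ht, hab]

theorem reduceOnce_some_foldl {l l' : List Char} (h : reduceOnce l = some l')
    {st : List Char} (hst : Good st) :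
    l'.foldl stepB st = l.foldl stepB st := by
  induction l generalizing l' st with
  | nil => simp [reduceOnce] at h
  | cons a t ih =>
      cases t with
      | nil => simp [reduceOnce] at h
      | cons b rest =>
          by_cases hr : pySwapcase a = b
          · simp only [reduceOnce, if_pos hr, Option.some.injEq] at h
            subst h
            simp only [List.foldl_cons]
            rw [cancel hst hr]
          · simp only [reduceOnce, if_neg hr, Option.map_eq_some_iff] at h
            obtain ⟨m, hm, rfl⟩ := h
            simp only [List.foldl_cons]
            exact ih hm (good_step hst a)

theorem reduceOnce_none_chain {l : List Char} (h : reduceOnce l = none) :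
    List.IsChain (fun a b => pySwapcase a ≠ b) l := by
  induction l with
  | nil => simp
  | cons a t ih =>
      cases t with
      | nil => simp
      | cons b rest =>
          by_cases hr : pySwapcase a = b
          · simp [reduceOnce, hr] at h
          · simp only [reduceOnce, if_neg hr, Option.map_eq_none_iff] at h
            exact List.isChain_cons_cons.mpr ⟨hr, ih h⟩

-- with no reacting adjacent pair and a compatible stack top, the fold only pushes
theorem nopair_foldl (l : List Char) (st : List Char)
    (hc : List.IsChain (fun a b => pySwapcase a ≠ b) l)
    (hhd : ∀ t r c m, st = t :: r → l = c :: m → pySwapcase t ≠ c) :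
    l.foldl stepB st = l.reverse ++ st := by
  induction l generalizing st with
  | nil => simp
  | cons c m ih =>
      have hpush : stepB st c = c :: st := by
        cases st with
        | nil => rfl
        | cons t r => simp [stepB, hhd t r c m rfl rfl]
      simp only [List.foldl_cons, hpush]
      rw [ih (c :: st) hc.tail ?_]
      · simp
      · intro t r c' m' h1 h2
        injection h1 with h1a h1b
        subst h1a; subst h2
        exact (List.isChain_cons_cons.mp hc).1

theorem reduceAll_foldl (l : List Char) :
    (reduceAll l).foldl stepB [] = l.foldl stepB [] := by
  rw [reduceAll]
  split
  · next l' h =>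
      rw [reduceAll_foldl l', reduceOnce_some_foldl h (by simp [Good])]
  · rfl
termination_by l.length
decreasing_by have := reduceOnce_length ‹_›; omega

theorem reduceAll_none (l : List Char) : reduceOnce (reduceAll l) = none := by
  rw [reduceAll]
  split
  · next l' h => exact reduceAll_none l'
  · assumption
termination_by l.length
decreasing_by have := reduceOnce_length ‹_›; omega

theorem length_reduceAll (l : List Char) :
    (reduceAll l).length = (l.foldl stepB []).length := by
  have h1 : (reduceAll l).foldl stepB [] = l.foldl stepB [] := reduceAll_foldl l
  have h2 : (reduceAll l).foldl stepB [] = (reduceAll l).reverse ++ [] :=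
    nopair_foldl _ _ (reduceOnce_none_chain (reduceAll_none l)) (by rintro t r c m h _; cases h)
  rw [← h1, h2]
  simp

-- ===== VERDICT (by name: the statement is the Claim_ definition above) =====
theorem getReducedPolymerLen_spec : Claim_equal_getReducedPolymerLen := by
  intro s _
  unfold Spec_getReducedPolymerLen getReducedPolymerLen getReducedPolymerLen_alt
  have h := foldl_reverse_eq s.toList []
  simp only [List.reverse_nil] at h
  rw [h, List.length_reverse, length_reduceAll]
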